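-- pv_equiv track=rewrite | github.com/1qqd/RMC_MCNP_transfer | RMC/controller/refuel.py | _reverse_strategy
-- ===== SOURCE A (Python) =====
-- def _reverse_strategy(strategy):
--     rev_strategy = {}
--     for key in strategy:
--         if strategy[key] >= 0:
--             if strategy[key] in rev_strategy:
--                 raise ValueError('Refuelling matrix error, duplicate assemblies.')
--             rev_strategy[strategy[key]] = key
--     return rev_strategy
-- ===== SOURCE B (Python) =====
-- def _reverse_strategy(strategy):
--     vals = [strategy[k] for k in strategy if strategy[k] >= 0]
--     if len(vals) != len(set(vals)):
--         raise ValueError('Refuelling matrix error, duplicate assemblies.')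
--     return {strategy[k]: k for k in strategy if strategy[k] >= 0}
-- ===== Notes on version B (the rewrite author's own statement) =====
-- stated objective: simpler
-- what changed: A's single incremental loop with a per-step membership test and early raise is replaced by a collect/bulk-check/build decomposition: gather the non-negative values, detect duplicates once via len(vals) != len(set(vals)), then build the inverted dict with a comprehension.
-- outside the precondition, e.g. on _reverse_strategy({1: 5, 2: 5}): A raises ValueError, B raises ValueError
import Mathlib
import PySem

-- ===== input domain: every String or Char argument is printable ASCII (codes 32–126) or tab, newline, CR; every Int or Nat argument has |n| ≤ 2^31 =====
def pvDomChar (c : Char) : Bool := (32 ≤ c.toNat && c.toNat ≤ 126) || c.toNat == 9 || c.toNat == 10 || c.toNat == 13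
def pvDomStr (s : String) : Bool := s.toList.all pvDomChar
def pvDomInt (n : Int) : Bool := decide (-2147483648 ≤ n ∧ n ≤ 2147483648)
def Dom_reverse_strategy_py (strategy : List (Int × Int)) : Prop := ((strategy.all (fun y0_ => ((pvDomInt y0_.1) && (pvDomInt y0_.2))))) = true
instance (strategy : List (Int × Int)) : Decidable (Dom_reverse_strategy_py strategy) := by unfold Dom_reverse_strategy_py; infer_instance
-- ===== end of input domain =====

-- B replaces A's incremental insert-with-membership-check loop by a collect / bulk duplicate-check /
-- build-by-comprehension decomposition (objective: simpler); both raise ValueError on duplicate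
-- non-negative values, excluded by Pre_.


-- ===== PORT A =====
-- 'for key in strategy: v = strategy[key]' iterates the dict's (key, value) items in insertion order.
def reverse_strategy_py (strategy : List (Int × Int)) : List (Int × Int) :=
  (strategy.foldl
    (fun (rev : PySem.Dict Int Int) p =>
      if p.2 ≥ 0 then
        if rev.contains p.2 then rev  -- Python raises ValueError here; excluded by Pre_
        else rev.insert p.2 p.1
      else rev)
    PySem.Dict.empty).items

-- ===== PORT B =====
def reverse_strategy_py_alt (strategy : List (Int × Int)) : List (Int × Int) :=
  let vals := (strategy.filter (fun p => p.2 ≥ 0)).map Prod.snd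
  if vals.length ≠ (PySem.Set.ofList vals).length then
    []  -- Python raises ValueError here; excluded by Pre_
  else
    (strategy.filter (fun p => p.2 ≥ 0)).map (fun p => (p.2, p.1))

-- ===== PRECONDITION & SPEC =====
-- Pre_ excludes (a) duplicate non-negative values, on which both A and B raise ValueError, and
-- (b) pair lists with duplicate keys, which do not represent a Python dict (A's argument is a dict).
def Pre_reverse_strategy_py (strategy : List (Int × Int)) : Prop :=
  (strategy.map Prod.fst).Nodup ∧ ((strategy.filter (fun p => p.2 ≥ 0)).map Prod.snd).Nodup
instance (strategy : List (Int × Int)) : Decidable (Pre_reverse_strategy_py strategy) := by unfold Pre_reverse_strategy_py; infer_instance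

def pvWitness_reverse_strategy_py : (List (Int × Int)) := [(1, 3), (2, -1), (4, 0)]

def Spec_reverse_strategy_py (strategy : List (Int × Int)) (out : List (Int × Int)) : Prop := out = reverse_strategy_py_alt strategy
instance (strategy : List (Int × Int)) (out : List (Int × Int)) : Decidable (Spec_reverse_strategy_py strategy out) := by unfold Spec_reverse_strategy_py; infer_instance

-- ===== CLAIM (what is proved, stated in full; the proofs are below) =====
def Claim_equal_reverse_strategy_py : Prop := ∀ (strategy : List (Int × Int)), Dom_reverse_strategy_py strategy → Pre_reverse_strategy_py strategy → Spec_reverse_strategy_py strategy (reverse_strategy_py strategy)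

-- ===== LEMMAS AND PROOFS =====

-- A's loop over a list whose non-negative values are fresh and pairwise distinct appends the
-- swapped filtered pairs to the accumulator dict.
theorem revA_foldl_items (l : List (Int × Int)) (d : PySem.Dict Int Int)
    (hnd : ((l.filter (fun p => p.2 ≥ 0)).map Prod.snd).Nodup)
    (hfresh : ∀ p ∈ l, p.2 ≥ 0 → d.contains p.2 = false) :
    (l.foldl
      (fun (rev : PySem.Dict Int Int) p =>
        if p.2 ≥ 0 then
          if rev.contains p.2 then rev else rev.insert p.2 p.1
        else rev) d).items
    = d.items ++ (l.filter (fun p => p.2 ≥ 0)).map (fun p => (p.2, p.1)) := by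
  induction l generalizing d with
  | nil => simp
  | cons p l ih =>
    by_cases hp : p.2 ≥ 0
    · have hc : d.contains p.2 = false := hfresh p List.mem_cons_self hp
      simp only [List.filter_cons, hp, decide_true, if_true, List.map_cons, List.nodup_cons] at hnd
      have hfresh' : ∀ q ∈ l, q.2 ≥ 0 → (d.insert p.2 p.1).contains q.2 = false := by
        intro q hq hq2
        rw [PySem.Dict.contains_insert]
        have hqne : q.2 ≠ p.2 := by
          intro he
          apply hnd.1
          rw [← he]
          exact List.mem_map_of_mem (List.mem_filter.mpr ⟨hq, by simpa using hq2⟩)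
        simp [hqne, hfresh q (List.mem_cons_of_mem _ hq) hq2]
      simp only [List.foldl_cons, List.filter_cons, hp, decide_true, if_true, hc,
        Bool.false_eq_true, if_false, List.map_cons]
      rw [ih (d.insert p.2 p.1) hnd.2 hfresh',
        PySem.Dict.items_insert_of_not_contains _ _ hc]
      simp
    · have hpd : decide (p.2 ≥ 0) = false := by simpa using hp
      simp only [List.filter_cons, hpd, Bool.false_eq_true, if_false] at hnd ⊢
      rw [List.foldl_cons, if_neg hp]
      exact ih d hnd (fun q hq hq2 => hfresh q (List.mem_cons_of_mem _ hq) hq2)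

-- ===== VERDICT (by name: the statement is the Claim_ definition above) =====
theorem reverse_strategy_py_spec : Claim_equal_reverse_strategy_py := by
  intro strategy _ hpre
  unfold Spec_reverse_strategy_py reverse_strategy_py reverse_strategy_py_alt
  have hnd := hpre.2
  rw [revA_foldl_items strategy PySem.Dict.empty hnd (by intro p _ _; simp)]
  simp [PySem.Set.ofList_eq_self_of_nodup _ hnd, PySem.Dict.empty]
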